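-- pv_equiv track=rewrite | github.com/toki0411/Algorithm | 프로그래머스/Lv.3/12938. 최고의 집합/최고의 집합.py | solution
-- ===== SOURCE A (Python) =====
-- def solution(n, s):
--     answer = []
--     if s < n:
--         return [-1]
--     else:
--         k = s // n
--         for i in range(n):
--             answer.append(k)
--
--         s = s%n
--         if s != 0:
--             for a in range(len(answer)):
--                 answer[a] += 1
--                 s -= 1
--                 if s == 0:
--                     break
--
--         answer.sort()
--     return answer
-- ===== SOURCE B (Python) =====
-- def solution(n, s):
--     if s < n:
--         return [-1]
--     k, r = divmod(s, n)
--     return [k] * (n - r) + [k + 1] * r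
-- ===== Notes on version B (the rewrite author's own statement) =====
-- stated objective: faster
-- what changed: B computes (k,r)=divmod(s,n) once and builds the answer directly as (n-r) copies of k followed by r copies of k+1, eliminating A's append loop, in-place increment loop and final sort.
import Mathlib
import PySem

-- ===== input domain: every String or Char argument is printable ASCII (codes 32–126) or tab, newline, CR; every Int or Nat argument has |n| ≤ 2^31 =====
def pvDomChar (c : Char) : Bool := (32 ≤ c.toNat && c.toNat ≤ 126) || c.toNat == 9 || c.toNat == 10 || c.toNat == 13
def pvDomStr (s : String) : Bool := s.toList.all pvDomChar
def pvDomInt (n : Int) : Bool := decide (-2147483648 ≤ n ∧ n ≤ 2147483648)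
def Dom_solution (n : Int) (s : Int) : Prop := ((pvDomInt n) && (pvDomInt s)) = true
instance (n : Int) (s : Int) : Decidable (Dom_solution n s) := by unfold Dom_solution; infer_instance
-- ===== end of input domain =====

-- B replaces A's append loop + increment loop + sort by directly building
-- (n-r) copies of k followed by r copies of k+1 from (k,r) = divmod(s,n): no sort (objective: faster).

-- ===== PORT A =====
-- the 'for a in range(len(answer)): answer[a]+=1; s-=1; if s==0: break' loop
def solutionIncLoop : List Int → Int → List Int
  | [], _ => []
  | x :: xs, t => if t - 1 == 0 then (x + 1) :: xs else (x + 1) :: solutionIncLoop xs (t - 1)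

def solution (n : Int) (s : Int) : List Int :=
  if s < n then [-1]
  else
    let k := PySem.Int.floordiv s n
    let answer := (PySem.List.pyRange 0 n 1).foldl (fun acc _ => acc ++ [k]) []
    let s1 := PySem.Int.mod s n
    let answer := if s1 ≠ 0 then solutionIncLoop answer s1 else answer
    PySem.List.sorted answer (fun x => x)

-- ===== PORT B =====
def solution_alt (n : Int) (s : Int) : List Int :=
  if s < n then [-1]
  else
    let k := PySem.Int.floordiv s n
    let r := PySem.Int.mod s n
    List.replicate (n - r).toNat k ++ List.replicate r.toNat (k + 1)

-- ===== PRECONDITION & SPEC =====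
-- Pre_ excludes only n = 0 with s ≥ 0, where A (and B) raise ZeroDivisionError.
def Pre_solution (n : Int) (s : Int) : Prop := n ≠ 0 ∨ s < 0
instance (n : Int) (s : Int) : Decidable (Pre_solution n s) := by unfold Pre_solution; infer_instance
def pvWitness_solution : Int × Int := (3, 7)

def Spec_solution (n : Int) (s : Int) (out : List Int) : Prop := out = solution_alt n s
instance (n : Int) (s : Int) (out : List Int) : Decidable (Spec_solution n s out) := by unfold Spec_solution; infer_instance

-- ===== CLAIM (what is proved, stated in full; the proofs are below) =====
def Claim_equal_solution : Prop := ∀ (n : Int) (s : Int), Dom_solution n s → Pre_solution n s → Spec_solution n s (solution n s)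

-- ===== LEMMAS AND PROOFS =====

theorem pv_foldl_append (L : List Int) (k : Int) (acc : List Int) :
    L.foldl (fun a _ => a ++ [k]) acc = acc ++ List.replicate L.length k := by
  induction L generalizing acc with
  | nil => simp
  | cons x xs ih => simp [List.foldl, ih, List.replicate_succ]

theorem pv_pyRange_nil {n : Int} (h : n ≤ 0) : PySem.List.pyRange 0 n 1 = [] := by
  simp [PySem.List.pyRange]
  omega

theorem pv_pyRange_len {n : Int} (h : 0 < n) : (PySem.List.pyRange 0 n 1).length = n.toNat := by
  have : n = ((n.toNat : Nat) : Int) := by omega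
  rw [this, PySem.List.pyRange_zero_natCast]
  simp
  omega

theorem pv_incLoop_replicate (k : Int) : ∀ (m : Nat) (t : Int), 0 < t → t ≤ (m : Int) →
    solutionIncLoop (List.replicate m k) t
      = List.replicate t.toNat (k + 1) ++ List.replicate (m - t.toNat) k := by
  intro m
  induction m with
  | zero => intro t h1 h2; omega
  | succ m ih =>
    intro t h1 h2
    rw [List.replicate_succ, solutionIncLoop]
    by_cases ht : t = 1
    · subst ht; simp
    · have hne : (t - 1 == 0) = false := by simp; omega
      rw [hne]
      simp only [Bool.false_eq_true, if_false]
      rw [ih (t - 1) (by omega) (by omega)]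
      have h3 : t.toNat = (t - 1).toNat + 1 := by omega
      rw [h3]
      have h5 : m + 1 - ((t - 1).toNat + 1) = m - (t - 1).toNat := by omega
      rw [h5, List.replicate_succ]
      simp

theorem pv_sorted_two_blocks (k : Int) (a b : Nat) :
    PySem.List.sorted (List.replicate a (k + 1) ++ List.replicate b k) (fun x => x)
      = List.replicate b k ++ List.replicate a (k + 1) := by
  apply PySem.List.sorted_id_eq_of_perm_of_pairwise
  · exact List.perm_append_comm
  · rw [List.pairwise_append]
    refine ⟨?_, ?_, ?_⟩
    · exact List.pairwise_replicate.mpr (Or.inr le_rfl)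
    · exact List.pairwise_replicate.mpr (Or.inr le_rfl)
    · intro x hx y hy
      rw [List.mem_replicate] at hx hy
      omega

-- ===== VERDICT (by name: the statement is the Claim_ definition above) =====
theorem solution_spec : Claim_equal_solution := by
  intro n s _ hpre
  unfold Spec_solution solution solution_alt
  by_cases hlt : s < n
  · simp [hlt]
  · simp only [hlt, if_false]
    have hn0 : n ≠ 0 := by
      rcases hpre with h | h
      · exact h
      · intro he; subst he; omega
    set k := PySem.Int.floordiv s n with hk
    set r := PySem.Int.mod s n with hr
    rcases lt_or_gt_of_ne hn0 with hneg | hpos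
    · -- n < 0 : A builds nothing, B builds two empty blocks
      have hrng : PySem.List.pyRange 0 n 1 = [] := pv_pyRange_nil (by omega)
      have hrb : r ≤ 0 ∧ n < r := by
        have h1 : PySem.Int.mod (-s) (-n) = (-s) % (-n) :=
          PySem.Int.mod_eq_emod_of_pos (by omega)
        have hm := PySem.Int.mod_neg_neg s n
        have h2 : r = -((-s) % (-n)) := by rw [hr]; omega
        have h3 : 0 ≤ (-s) % (-n) := Int.emod_nonneg _ (by omega)
        have h4 : (-s) % (-n) < -n := Int.emod_lt_of_pos _ (by omega)
        omega
      rw [hrng]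
      simp only [List.foldl_nil]
      have : (if r ≠ 0 then solutionIncLoop ([] : List Int) r else []) = [] := by
        by_cases h : r = 0 <;> simp [h, solutionIncLoop]
      rw [this]
      have e1 : (n - r).toNat = 0 := by omega
      have e2 : r.toNat = 0 := by omega
      rw [e1, e2]
      simp [PySem.List.sorted]
    · -- n > 0 : the main case
      have hrb : 0 ≤ r ∧ r < n := by
        have h1 : r = s % n := hr ▸ PySem.Int.mod_eq_emod_of_pos hpos
        have h3 : 0 ≤ s % n := Int.emod_nonneg _ (by omega)
        have h4 : s % n < n := Int.emod_lt_of_pos _ hpos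
        omega
      rw [pv_foldl_append, pv_pyRange_len hpos]
      simp only [List.nil_append]
      by_cases hr0 : r = 0
      · simp only [hr0, ne_eq, not_true_eq_false, if_false]
        rw [PySem.List.sorted_eq_self_of_pairwise _ _
          (List.pairwise_replicate.mpr (Or.inr le_rfl))]
        simp
      · simp only [ne_eq, hr0, not_false_eq_true, if_true]
        rw [pv_incLoop_replicate k n.toNat r (by omega) (by omega)]
        rw [pv_sorted_two_blocks]
        have : n.toNat - r.toNat = (n - r).toNat := by omega
        rw [this]
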